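-- pv_equiv track=rewrite | github.com/Nm02/algoritmos-.py | Archivos_coni.py | BuscarCuantasVecesSeVisitoCadaPagina
-- ===== SOURCE A (Python) =====
-- def BuscarCuantasVecesSeVisitoCadaPagina(paginas):
--     PaginasYaTomadas=[]
--     for i in range(0,len(paginas)):
--         A=0
--         for j in range (0,len(PaginasYaTomadas)):
--             if PaginasYaTomadas[j][0]!=paginas[i]:
--               A=A+1
--             else:
--               PaginasYaTomadas[j][1]+=1
--         if A==len(PaginasYaTomadas):
--           PaginasYaTomadas.append([])
--           PaginasYaTomadas[len(PaginasYaTomadas)-1].append(paginas[i])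
--           PaginasYaTomadas[len(PaginasYaTomadas)-1].append(1)
--     return PaginasYaTomadas
-- ===== SOURCE B (Python) =====
-- def BuscarCuantasVecesSeVisitoCadaPagina(paginas):
--     # Two passes: collect distinct pages in first-appearance order, then count each.
--     orden = []
--     for p in paginas:
--         if p not in orden:
--             orden.append(p)
--     return [[p, paginas.count(p)] for p in orden]
-- ===== Notes on version B (the rewrite author's own statement) =====
-- stated objective: simpler
-- what changed: Replaces A's fused build-and-count loop (which rescans and mutates the growing result list on every element) with two plain passes: first collect distinct pages in first-appearance order, then emit [page, paginas.count(page)] for each.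
import Mathlib
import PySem

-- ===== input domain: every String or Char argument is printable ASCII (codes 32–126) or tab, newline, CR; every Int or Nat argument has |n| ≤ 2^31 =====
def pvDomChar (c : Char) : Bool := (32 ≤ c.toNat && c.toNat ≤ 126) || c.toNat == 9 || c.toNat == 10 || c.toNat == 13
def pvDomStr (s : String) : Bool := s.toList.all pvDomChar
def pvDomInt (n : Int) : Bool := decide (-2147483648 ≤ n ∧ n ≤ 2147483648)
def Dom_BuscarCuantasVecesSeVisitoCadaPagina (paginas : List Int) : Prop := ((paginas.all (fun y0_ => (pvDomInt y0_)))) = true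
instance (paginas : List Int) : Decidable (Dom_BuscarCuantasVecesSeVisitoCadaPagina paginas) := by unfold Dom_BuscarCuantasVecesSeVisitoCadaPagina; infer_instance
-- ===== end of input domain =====

-- B replaces A's fused build-and-count loop with two plain passes (distinct pages in
-- first-appearance order, then a count per page); same cost, simpler decomposition.


-- ===== PORT A =====
-- inner 'for j' loop: counts non-matching entries in A (first component) and bumps
-- the count of every matching [p, c] entry (entries are always 2-element lists;
-- the catch-all branch is unreachable since A only ever appends [p, 1]).
def pvAInner (x : Int) : List (List Int) → Nat × List (List Int)
  | [] => (0, [])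
  | e :: rest =>
    let r := pvAInner x rest
    match e with
    | [p, c] => if p ≠ x then (r.1 + 1, [p, c] :: r.2) else (r.1, [p, c + 1] :: r.2)
    | _ => (r.1 + 1, e :: r.2)

-- outer 'for i' loop over paginas, threading PaginasYaTomadas
def pvAOuter (s : List (List Int)) : List Int → List (List Int)
  | [] => s
  | x :: rest =>
    let r := pvAInner x s
    pvAOuter (if r.1 = s.length then r.2 ++ [[x, 1]] else r.2) rest

def BuscarCuantasVecesSeVisitoCadaPagina (paginas : List Int) : List (List Int) :=
  pvAOuter [] paginas

-- ===== PORT B =====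
-- pass 1 of Source B: distinct pages in first-appearance order ('if p not in orden: orden.append(p)')
def pvBOrden (paginas : List Int) : List Int :=
  paginas.foldl (fun acc p => if acc.contains p then acc else acc ++ [p]) []

-- pass 2 of Source B: [[p, paginas.count(p)] for p in orden]
def BuscarCuantasVecesSeVisitoCadaPagina_alt (paginas : List Int) : List (List Int) :=
  (pvBOrden paginas).map (fun p => [p, (PySem.List.count paginas p : Int)])

-- ===== PRECONDITION & SPEC =====
def Spec_BuscarCuantasVecesSeVisitoCadaPagina (paginas : List Int) (out : List (List Int)) : Prop := out = BuscarCuantasVecesSeVisitoCadaPagina_alt paginas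
instance (paginas : List Int) (out : List (List Int)) : Decidable (Spec_BuscarCuantasVecesSeVisitoCadaPagina paginas out) := by unfold Spec_BuscarCuantasVecesSeVisitoCadaPagina; infer_instance

-- ===== CLAIM (what is proved, stated in full; the proofs are below) =====
def Claim_equal_BuscarCuantasVecesSeVisitoCadaPagina : Prop := ∀ (paginas : List Int), Dom_BuscarCuantasVecesSeVisitoCadaPagina paginas → Spec_BuscarCuantasVecesSeVisitoCadaPagina paginas (BuscarCuantasVecesSeVisitoCadaPagina paginas)

-- ===== LEMMAS AND PROOFS =====

-- the canonical shape of A's state after a prefix 'pre': one [p, count] entry per distinct page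
def pvModel (pre orden : List Int) : List (List Int) :=
  orden.map (fun p => [p, (pre.count p : Int)])

lemma pvBOrden_eq_ofList (paginas : List Int) :
    pvBOrden paginas = PySem.Set.ofList paginas := by
  rw [PySem.Set.ofList_eq_foldl]
  rfl

-- the inner loop on a map-shaped state: counts the non-matching keys, bumps the matching ones
lemma pvAInner_map (x : Int) (orden : List Int) (c : Int → Int) :
    pvAInner x (orden.map (fun p => [p, c p])) =
      (orden.countP (fun p => p ≠ x),
       orden.map (fun p => [p, if p = x then c p + 1 else c p])) := by
  induction orden with
  | nil => rfl
  | cons p rest ih =>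
    simp only [List.map_cons, pvAInner, ih, List.countP_cons]
    by_cases h : p = x
    · subst h; simp
    · simp [h]

lemma pvStep (pre : List Int) (x : Int) :
    (let s := pvModel pre (PySem.Set.ofList pre)
     let r := pvAInner x s
     if r.1 = s.length then r.2 ++ [[x, 1]] else r.2) =
      pvModel (pre ++ [x]) (PySem.Set.ofList (pre ++ [x])) := by
  have hnodup := PySem.Set.nodup_ofList (xs := pre)
  have hmem : ∀ p, p ∈ PySem.Set.ofList pre ↔ p ∈ pre := fun p => PySem.Set.mem_ofList _ _
  simp only [pvModel, pvAInner_map, List.length_map]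
  by_cases hx : x ∈ pre
  · -- x already has an entry: its count is bumped, nothing is appended
    have hxo : x ∈ PySem.Set.ofList pre := (hmem x).2 hx
    have hne : ¬ (PySem.Set.ofList pre).countP (fun p => decide (p ≠ x)) =
        (PySem.Set.ofList pre).length := by
      intro h
      have := (List.countP_eq_length).1 h x hxo
      simp at this
    rw [PySem.Set.ofList_append_singleton, PySem.Set.add_of_mem hxo]
    simp only [hne, if_false]
    refine List.map_congr_left (fun p _ => ?_)
    by_cases hpx : p = x
    · subst hpx; simp [List.count_append]
    · simp [List.count_append, hpx, Ne.symm hpx]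
  · -- new page: every entry mismatches, a fresh [x, 1] entry is appended
    have hxo : x ∉ PySem.Set.ofList pre := fun h => hx ((hmem x).1 h)
    have heq : (PySem.Set.ofList pre).countP (fun p => decide (p ≠ x)) =
        (PySem.Set.ofList pre).length := by
      refine List.countP_eq_length.2 (fun p hp => ?_)
      simp only [decide_eq_true_eq]
      exact fun h => hxo (h ▸ hp)
    rw [PySem.Set.ofList_append_singleton, PySem.Set.add_of_not_mem hxo]
    simp only [heq, if_true, List.map_append, List.map_cons, List.map_nil]
    congr 1
    · refine List.map_congr_left (fun p hp => ?_)
      have hpx : p ≠ x := fun h => hxo (h ▸ hp)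
      simp [List.count_append, hpx, Ne.symm hpx]
    · have : pre.count x = 0 := List.count_eq_zero.2 hx
      simp [List.count_append, this]

lemma pvAOuter_model : ∀ (rest pre : List Int),
    pvAOuter (pvModel pre (PySem.Set.ofList pre)) rest =
      pvModel (pre ++ rest) (PySem.Set.ofList (pre ++ rest)) := by
  intro rest
  induction rest with
  | nil => intro pre; simp [pvAOuter]
  | cons x rest ih =>
    intro pre
    show pvAOuter _ _ = _
    rw [pvAOuter, pvStep pre x, ih (pre ++ [x])]
    simp

-- ===== VERDICT (by name: the statement is the Claim_ definition above) =====
theorem BuscarCuantasVecesSeVisitoCadaPagina_spec : Claim_equal_BuscarCuantasVecesSeVisitoCadaPagina := by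
  intro paginas _
  show BuscarCuantasVecesSeVisitoCadaPagina paginas = BuscarCuantasVecesSeVisitoCadaPagina_alt paginas
  have h0 : pvModel [] (PySem.Set.ofList ([] : List Int)) = [] := rfl
  have := pvAOuter_model paginas []
  rw [h0] at this
  simp only [List.nil_append] at this
  rw [BuscarCuantasVecesSeVisitoCadaPagina, this,
    BuscarCuantasVecesSeVisitoCadaPagina_alt, pvBOrden_eq_ofList, pvModel]
  refine List.map_congr_left (fun p _ => ?_)
  rw [PySem.List.count_eq]
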